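-- pv_equiv track=rewrite | github.com/cepxuozab/YandexTrainingAlgorithms | Training6/Lesson2/J_ExaminationOfEvidence/task.py | stop_numbers
-- ===== SOURCE A (Python) =====
-- def stop_numbers(a: list[int], x: list[int], num: int) -> list[int]:
--     left = [0 for _ in range(len(a))]
--     cnt = 0
--     for i in range(1, len(a)):
--         if a[i - 1] < a[i]:
--             left[i] = left[i - 1]
--         elif a[i - 1] > a[i]:
--             left[i] = i
--             cnt = 0
--         else:
--             cnt += 1
--             left[i] = left[i - 1]
--             while cnt > num:
--                 cnt -= a[left[i]] == a[left[i] + 1]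
--                 left[i] += 1
--     ans = []
--     for xi in x:
--         ans.append(left[xi - 1] + 1)
--     return ans
-- ===== SOURCE B (Python) =====
-- def stop_numbers(a: list[int], x: list[int], num: int) -> list[int]:
--     n = len(a)
--     left = [0] * n
--     q = []      # indices i with a[i-1] == a[i] inside the current window
--     head = 0    # queue head pointer (q[head:] are the live entries)
--     cur = 0     # current window start (left value of the last index)
--     for i in range(1, n):
--         if a[i - 1] > a[i]:
--             cur = i
--             head = len(q)           # clear the queue
--         elif a[i - 1] == a[i]:
--             q.append(i)
--             if len(q) - head > num:
--                 cur = q[head]       # evict the oldest equal pair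
--                 head += 1
--         left[i] = cur
--     return [left[xi - 1] + 1 for xi in x]
-- ===== Notes on version B (the rewrite author's own statement) =====
-- stated objective: alternative
-- what changed: Replaces A's amortized inner while-loop that rescans the array for the next equal pair by an explicit queue of equal-pair positions with a head pointer: on a decrease the queue is cleared, on an equal pair the position is appended and, when the window holds more than num equal pairs, the oldest entry is popped and becomes the new window start.
import Mathlib
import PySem

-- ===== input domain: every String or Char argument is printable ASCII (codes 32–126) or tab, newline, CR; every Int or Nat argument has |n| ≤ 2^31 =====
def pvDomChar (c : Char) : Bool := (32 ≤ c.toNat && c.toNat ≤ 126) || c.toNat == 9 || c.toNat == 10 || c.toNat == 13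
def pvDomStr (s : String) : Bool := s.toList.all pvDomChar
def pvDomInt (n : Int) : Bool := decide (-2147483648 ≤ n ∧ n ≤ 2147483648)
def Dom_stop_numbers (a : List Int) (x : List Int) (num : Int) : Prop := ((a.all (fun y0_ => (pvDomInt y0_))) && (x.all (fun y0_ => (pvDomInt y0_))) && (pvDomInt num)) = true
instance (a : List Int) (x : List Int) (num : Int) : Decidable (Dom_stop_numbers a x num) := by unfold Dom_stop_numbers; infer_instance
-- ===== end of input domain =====

-- B replaces A's amortized inner while-rescan by an explicit queue of equal-pair
-- positions with a head pointer (objective: alternative decomposition, same O(n) cost).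

-- ===== PORT A =====
-- inner 'while cnt > num' loop of A; fuel only makes it total (a.length+1 suffices on Pre_)
def pvWhileA (a : List Int) (num : Int) : Nat → Int → Int → Int × Int
  | 0, cnt, l => (cnt, l)
  | fuel+1, cnt, l =>
    if num < cnt then
      match PySem.List.pyGet? a l, PySem.List.pyGet? a (l+1) with
      | some u, some v => pvWhileA a num fuel (cnt - (if u = v then 1 else 0)) (l+1)
      | _, _ => (cnt, l)   -- Python raises IndexError here (outside Pre_)
    else (cnt, l)

-- one iteration of A's main for-loop; state = (left, cnt)
def pvStepA (a : List Int) (num : Int) (s : List Int × Int) (i : Int) : List Int × Int :=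
  match PySem.List.pyGet? a (i-1), PySem.List.pyGet? a i with
  | some p, some c =>
    if p < c then (PySem.List.pySetD s.1 i (PySem.List.pyGetD s.1 (i-1) 0), s.2)
    else if p > c then (PySem.List.pySetD s.1 i i, 0)
    else
      let r := pvWhileA a num (a.length+1) (s.2+1) (PySem.List.pyGetD s.1 (i-1) 0)
      (PySem.List.pySetD s.1 i r.2, r.1)
  | _, _ => s

def stop_numbers (a : List Int) (x : List Int) (num : Int) : List Int :=
  let st := (PySem.List.pyRange 1 (a.length : Int) 1).foldl (pvStepA a num)
              (List.replicate a.length (0:Int), (0:Int))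
  x.map (fun xi => PySem.List.pyGetD st.1 (xi-1) 0 + 1)

-- ===== PORT B =====
-- one iteration of B's loop; state = (left, q, head, cur)
def pvStepB (a : List Int) (num : Int) (s : List Int × List Int × Int × Int) (i : Int) :
    List Int × List Int × Int × Int :=
  match s with
  | (left, q, head, cur) =>
    match PySem.List.pyGet? a (i-1), PySem.List.pyGet? a i with
    | some p, some c =>
      if p > c then (PySem.List.pySetD left i i, q, (q.length : Int), i)
      else if p = c then
        let q2 := q ++ [i]
        if num < (q2.length : Int) - head then
          let cur' := PySem.List.pyGetD q2 head 0
          (PySem.List.pySetD left i cur', q2, head+1, cur')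
        else (PySem.List.pySetD left i cur, q2, head, cur)
      else (PySem.List.pySetD left i cur, q, head, cur)
    | _, _ => s

def stop_numbers_alt (a : List Int) (x : List Int) (num : Int) : List Int :=
  let st := (PySem.List.pyRange 1 (a.length : Int) 1).foldl (pvStepB a num)
              (List.replicate a.length (0:Int), ([] : List Int), (0:Int), (0:Int))
  x.map (fun xi => PySem.List.pyGetD st.1 (xi-1) 0 + 1)

-- ===== PRECONDITION & SPEC =====
-- Pre_ excludes exactly the inputs where A raises IndexError: a negative num together with
-- an adjacent equal pair (A's inner while then scans past the end of a), or a query index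
-- xi-1 outside a's Python index range (B raises there too).
def Pre_stop_numbers (a : List Int) (x : List Int) (num : Int) : Prop :=
  (0 ≤ num ∨ List.IsChain (· ≠ ·) a) ∧ ∀ xi ∈ x, PySem.Raise.InRange a.length (xi - 1)
instance (a : List Int) (x : List Int) (num : Int) : Decidable (Pre_stop_numbers a x num) := by
  unfold Pre_stop_numbers; infer_instance

def pvWitness_stop_numbers : List Int × List Int × Int := ([1, 1, 2, 2, 1], [1, 3, 5], 1)

def Spec_stop_numbers (a : List Int) (x : List Int) (num : Int) (out : List Int) : Prop :=
  out = stop_numbers_alt a x num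
instance (a : List Int) (x : List Int) (num : Int) (out : List Int) :
    Decidable (Spec_stop_numbers a x num out) := by unfold Spec_stop_numbers; infer_instance

-- ===== CLAIM (what is proved, stated in full; the proofs are below) =====
def Claim_equal_stop_numbers : Prop := ∀ (a : List Int) (x : List Int) (num : Int),
  Dom_stop_numbers a x num → Pre_stop_numbers a x num →
  Spec_stop_numbers a x num (stop_numbers a x num)

-- ===== LEMMAS AND PROOFS =====

-- the queue predicate: position j is a live equal pair for window start cur
def pvEqP (a : List Int) (cur j : Int) : Bool :=
  decide (cur < j) && decide (PySem.List.pyGetD a (j-1) 0 = PySem.List.pyGetD a j 0)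

-- coupling invariant between A's state (left, cnt) and B's state (left, q, head, cur),
-- holding just before index i is processed
def pvInv (a : List Int) (num i : Int)
    (sA : List Int × Int) (sB : List Int × List Int × Int × Int) : Prop :=
  sA.1 = sB.1 ∧ sA.1.length = a.length ∧
  0 ≤ sB.2.2.2 ∧ sB.2.2.2 < i ∧
  0 ≤ sB.2.2.1 ∧ sB.2.2.1 ≤ (sB.2.1.length : Int) ∧
  PySem.List.pyGetD sA.1 (i-1) 0 = sB.2.2.2 ∧
  sA.2 = ((sB.2.1.drop sB.2.2.1.toNat).length : Int) ∧
  sB.2.1.drop sB.2.2.1.toNat = (PySem.List.pyRange 1 i 1).filter (pvEqP a sB.2.2.2) ∧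
  (0 ≤ num → sA.2 ≤ num)

lemma pvWhileA_of_le (a : List Int) (num : Int) (fuel : Nat) (cnt l : Int)
    (h : cnt ≤ num) : pvWhileA a num fuel cnt l = (cnt, l) := by
  cases fuel <;> simp [pvWhileA, not_lt.mpr h]

lemma pvWhileA_scan (a : List Int) (num : Int) (p : Int)
    (hp1 : p + 1 < (a.length : Int))
    (heq : PySem.List.pyGetD a p 0 = PySem.List.pyGetD a (p+1) 0) :
    ∀ (fuel : Nat) (l : Int), 0 ≤ l → l ≤ p → (p - l).toNat < fuel →
    (∀ t, l ≤ t → t < p → PySem.List.pyGetD a t 0 ≠ PySem.List.pyGetD a (t+1) 0) →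
    pvWhileA a num fuel (num+1) l = (num, p+1) := by
  intro fuel
  induction fuel with
  | zero => intro l _ _ hf _; omega
  | succ f ih =>
    intro l hl0 hlp hf hne
    have hg1 : PySem.List.pyGet? a l = some a[l.toNat] :=
      PySem.List.pyGet?_eq_some_getElem a hl0 (by omega)
    have hg2 : PySem.List.pyGet? a (l+1) = some a[(l+1).toNat] :=
      PySem.List.pyGet?_eq_some_getElem a (by omega) (by omega)
    have hd1 : PySem.List.pyGetD a l 0 = a[l.toNat] :=
      PySem.List.pyGetD_eq_getElem a 0 hl0 (by omega)
    have hd2 : PySem.List.pyGetD a (l+1) 0 = a[(l+1).toNat] :=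
      PySem.List.pyGetD_eq_getElem a 0 (by omega) (by omega)
    rw [pvWhileA, if_pos (by omega), hg1, hg2]
    by_cases hl : l = p
    · subst hl
      have hv : a[l.toNat] = a[(l+1).toNat] := by rw [← hd1, ← hd2]; exact heq
      simp only [hv, if_true]
      have h1 : num + 1 - (1:Int) = num := by omega
      rw [h1, pvWhileA_of_le a num f num (l+1) le_rfl]
    · have hv : a[l.toNat] ≠ a[(l+1).toNat] := by
        rw [← hd1, ← hd2]; exact hne l le_rfl (by omega)
      simp only [if_neg hv]
      have h0 : num + 1 - (0:Int) = num + 1 := by omega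
      rw [h0]
      exact ih (l+1) (by omega) (by omega) (by omega)
        (fun t ht1 ht2 => hne t (by omega) ht2)

lemma pvStep_lemma (a : List Int) (num : Int)
    (hP : 0 ≤ num ∨ List.IsChain (· ≠ ·) a)
    (k : Nat) (hk1 : 1 ≤ k) (hkn : k < a.length)
    (sA : List Int × Int) (sB : List Int × List Int × Int × Int)
    (h : pvInv a num (k : Int) sA sB) :
    pvInv a num ((k : Int)+1) (pvStepA a num sA (k : Int)) (pvStepB a num sB (k : Int)) := by
  obtain ⟨left, cnt⟩ := sA
  obtain ⟨leftB, q, head, cur⟩ := sB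
  obtain ⟨hLL, hlen, hcur0, hcuri, hh0, hhl, hget, hcnt, hq, hbound⟩ := h
  simp only at hLL hlen hcur0 hcuri hh0 hhl hget hcnt hq hbound
  subst hLL
  have hkn' : (k : Int) < (a.length : Int) := by exact_mod_cast hkn
  have hgA1 : PySem.List.pyGet? a ((k:Int)-1) = some a[((k:Int)-1).toNat] :=
    PySem.List.pyGet?_eq_some_getElem a (by omega) (by omega)
  have hgA2 : PySem.List.pyGet? a (k:Int) = some a[((k:Int)).toNat] :=
    PySem.List.pyGet?_eq_some_getElem a (by omega) (by omega)
  have hd1 : PySem.List.pyGetD a ((k:Int)-1) 0 = a[((k:Int)-1).toNat] :=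
    PySem.List.pyGetD_eq_getElem a 0 (by omega) (by omega)
  have hd2 : PySem.List.pyGetD a (k:Int) 0 = a[((k:Int)).toNat] :=
    PySem.List.pyGetD_eq_getElem a 0 (by omega) (by omega)
  have hht : head.toNat ≤ q.length := by omega
  have hrangek : PySem.List.pyRange 1 ((k:Int)+1) 1 = PySem.List.pyRange 1 (k:Int) 1 ++ [(k:Int)] :=
    PySem.List.pyRange_one_succ_right (by omega)
  set p := a[((k:Int)-1).toNat] with hp
  set c := a[((k:Int)).toNat] with hc
  unfold pvStepA pvStepB
  rw [hgA1, hgA2]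
  dsimp only
  have hsetlen : ∀ (v : Int), (PySem.List.pySetD left (k:Int) v).length = a.length := by
    intro v
    rw [PySem.List.pySetD_natCast, List.length_set, hlen]
  have hgetset : ∀ (v : Int), PySem.List.pyGetD (PySem.List.pySetD left (k:Int) v) ((k:Int)+1-1) 0 = v := by
    intro v
    have he : (k:Int)+1-1 = ((k:Nat) : Int) := by omega
    rw [he, PySem.List.pySetD_natCast, PySem.List.pyGetD_natCast]
    have hkl : k < left.length := by omega
    simp [List.getD, List.getElem?_set_self hkl]
  rcases lt_trichotomy p c with hpc | hpc | hpc
  · -- a[k-1] < a[k]: carry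
    rw [if_pos hpc, if_neg (by omega), if_neg (by omega), hget]
    unfold pvInv
    dsimp only
    refine ⟨rfl, hsetlen cur, hcur0, by omega, hh0, hhl, hgetset cur, hcnt, ?_, hbound⟩
    rw [hrangek, List.filter_append, hq]
    have hfalse : pvEqP a cur (k:Int) = false := by
      unfold pvEqP
      have hne : decide (PySem.List.pyGetD a ((k:Int)-1) 0 = PySem.List.pyGetD a (k:Int) 0) = false := by
        rw [hd1, hd2]; exact decide_eq_false (by omega)
      rw [hne, Bool.and_false]
    rw [List.filter_singleton, hfalse]
    simp
  · -- a[k-1] = a[k]: equality branch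
    rw [if_neg (by omega), if_neg (by omega), if_neg (by omega), if_pos hpc, hget]
    have hnum : 0 ≤ num := by
      rcases hP with h | h
      · exact h
      · exfalso
        rw [List.isChain_iff_getElem] at h
        have hne := h (((k:Int)-1).toNat) (by omega)
        apply hne
        calc a[((k:Int)-1).toNat] = p := hp.symm
          _ = c := hpc
          _ = a[((k:Int)-1).toNat + 1] := getElem_congr rfl (by omega) (by omega)
    have hq2drop : (q ++ [(k:Int)]).drop head.toNat = q.drop head.toNat ++ [(k:Int)] :=
      List.drop_append_of_le_length hht
    have hkpred : pvEqP a cur (k:Int) = true := by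
      unfold pvEqP
      have he : PySem.List.pyGetD a ((k:Int)-1) 0 = PySem.List.pyGetD a (k:Int) 0 := by
        rw [hd1, hd2]; exact hpc
      simp [hcuri, he]
    have hFnew : q.drop head.toNat ++ [(k:Int)]
        = (PySem.List.pyRange 1 ((k:Int)+1) 1).filter (pvEqP a cur) := by
      rw [hrangek, List.filter_append, hq]
      simp [hkpred]
    have hcntq : cnt = (q.length : Int) - head := by
      rw [hcnt, List.length_drop]; omega
    have hq2len : ((q ++ [(k:Int)]).length : Int) - head = cnt + 1 := by
      have hl1 : (q ++ [(k:Int)]).length = q.length + 1 := by simp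
      rw [hl1]; push_cast; omega
    by_cases hle : cnt + 1 ≤ num
    · -- queue not yet over capacity: no pop
      rw [pvWhileA_of_le a num (a.length+1) (cnt+1) cur hle, if_neg (by omega)]
      unfold pvInv
      dsimp only
      refine ⟨rfl, hsetlen cur, hcur0, by omega, hh0, by simp; omega, hgetset cur, ?_, ?_, fun _ => hle⟩
      · rw [hq2drop, List.length_append, hcnt]
        have hl1 : ([(k:Int)]).length = 1 := rfl
        rw [hl1]; push_cast; ring
      · rw [hq2drop, hFnew]
    · -- over capacity: A scans to the first equal pair, B pops the queue head
      have hcn : cnt = num := by omega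
      rw [if_pos (by omega)]
      -- the nonempty live queue  F' = j0 :: rest
      obtain ⟨j0, rest, hFc⟩ : ∃ j0 rest, q.drop head.toNat ++ [(k:Int)] = j0 :: rest := by
        cases q.drop head.toNat with
        | nil => exact ⟨_, _, rfl⟩
        | cons h t => exact ⟨_, _, rfl⟩
      have hmem : j0 ∈ (PySem.List.pyRange 1 ((k:Int)+1) 1).filter (pvEqP a cur) := by
        rw [← hFnew, hFc]; exact List.mem_cons_self
      have hmemF := List.mem_filter.mp hmem
      have hj0r := PySem.List.mem_pyRange_one.mp hmemF.1
      have hj0cur : cur < j0 := by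
        have := hmemF.2
        unfold pvEqP at this
        simp at this
        exact this.1
      have hj0eq : PySem.List.pyGetD a (j0-1) 0 = PySem.List.pyGetD a j0 0 := by
        have := hmemF.2
        unfold pvEqP at this
        simp at this
        exact this.2
      have hpw : (j0 :: rest).Pairwise (· < ·) := by
        rw [← hFc, hFnew]
        exact (PySem.List.pairwise_lt_pyRange_one 1 ((k:Int)+1)).filter _
      have hmin : ∀ j ∈ rest, j0 < j := fun j hj => List.rel_of_pairwise_cons hpw hj
      -- A's while loop lands exactly on j0
      have hscan : pvWhileA a num (a.length+1) (num+1) cur = (num, j0) := by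
        have he : (j0 - 1) + 1 = j0 := by omega
        have hres := pvWhileA_scan a num (j0-1) (by omega) (by rw [he]; exact hj0eq)
          (a.length+1) cur hcur0 (by omega) (by omega) ?_
        · rw [hres, he]
        · intro t ht1 ht2 hEq
          have hjmem : t + 1 ∈ (PySem.List.pyRange 1 ((k:Int)+1) 1).filter (pvEqP a cur) := by
            refine List.mem_filter.mpr ⟨PySem.List.mem_pyRange_one.mpr ⟨by omega, by omega⟩, ?_⟩
            unfold pvEqP
            have he2 : t + 1 - 1 = t := by omega
            rw [he2]
            simp [hEq]
            omega
          rw [← hFnew, hFc] at hjmem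
          rcases List.mem_cons.mp hjmem with h | h
          · omega
          · have := hmin _ h; omega
      have hcn1 : cnt + 1 = num + 1 := by omega
      rw [hcn1, hscan]
      -- B's popped head is j0
      have hcurB : PySem.List.pyGetD (q ++ [(k:Int)]) head 0 = j0 := by
        rw [PySem.List.pyGetD_of_nonneg _ _ hh0]
        have hget2 : (q ++ [(k:Int)])[head.toNat]? = some j0 := by
          have hdd : (List.drop head.toNat (q ++ [(k:Int)]))[0]? = (q ++ [(k:Int)])[head.toNat]? := by
            rw [List.getElem?_drop, Nat.add_zero]
          rw [← hdd, hq2drop, hFc]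
          rfl
        simp [List.getD, hget2]
      rw [hcurB]
      have hrestdrop : (q ++ [(k:Int)]).drop (head+1).toNat = rest := by
        have e : (head+1).toNat = head.toNat + 1 := by omega
        rw [e, ← List.drop_drop, hq2drop, hFc]
        rfl
      have hlenF : (q.drop head.toNat ++ [(k:Int)]).length = rest.length + 1 := by
        rw [hFc]; rfl
      unfold pvInv
      dsimp only
      refine ⟨rfl, hsetlen j0, by omega, by omega, by omega, ?_, hgetset j0, ?_, ?_, fun _ => le_rfl⟩
      · have hl1 : (q ++ [(k:Int)]).length = q.length + 1 := by simp
        rw [hl1]; push_cast; omega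
      · rw [hrestdrop]
        have h2 : (q.drop head.toNat).length + 1 = rest.length + 1 := by simpa using hlenF
        omega
      · rw [hrestdrop]
        have hshift : ∀ j : Int, pvEqP a j0 j = (decide (j0 < j) && pvEqP a cur j) := by
          intro j
          unfold pvEqP
          by_cases h1 : j0 < j
          · have h2 : cur < j := by omega
            simp [h1, h2]
          · simp [h1]
        calc rest = (j0 :: rest).filter (fun j => decide (j0 < j)) := by
                simp only [List.filter_cons]
                rw [if_neg (by simp)]
                exact (List.filter_eq_self.mpr (fun j hj => by simp [hmin j hj])).symm
          _ = ((PySem.List.pyRange 1 ((k:Int)+1) 1).filter (pvEqP a cur)).filter (fun j => decide (j0 < j)) := by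
                rw [← hFnew, hFc]
          _ = (PySem.List.pyRange 1 ((k:Int)+1) 1).filter (pvEqP a j0) := by
                rw [List.filter_filter]
                exact List.filter_congr (fun j _ => (hshift j).symm)
  · -- a[k-1] > a[k]: window resets
    rw [if_neg (by omega), if_pos hpc, if_pos hpc]
    unfold pvInv
    dsimp only
    refine ⟨rfl, hsetlen (k:Int), by omega, by omega, by omega, by simp, hgetset (k:Int), ?_, ?_, fun _ => by omega⟩
    · simp
    · have e : ((q.length : Int)).toNat = q.length := by omega
      rw [e, List.drop_length]
      refine (List.filter_eq_nil_iff.mpr ?_).symm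
      intro j hj
      have := PySem.List.mem_pyRange_one.mp hj
      unfold pvEqP
      simp
      intro h
      omega

lemma pvMain (a : List Int) (num : Int)
    (hP : 0 ≤ num ∨ List.IsChain (· ≠ ·) a)
    (k : Nat) (hk1 : 1 ≤ k) (hkn : k ≤ a.length) :
    pvInv a num (k : Int)
      ((PySem.List.pyRange 1 (k : Int) 1).foldl (pvStepA a num) (List.replicate a.length (0:Int), (0:Int)))
      ((PySem.List.pyRange 1 (k : Int) 1).foldl (pvStepB a num) (List.replicate a.length (0:Int), ([] : List Int), (0:Int), (0:Int))) := by
  induction k with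
  | zero => omega
  | succ k ih =>
    by_cases hk : k = 0
    · subst hk
      have hnil : PySem.List.pyRange 1 ((0:Nat) + 1 : Nat) 1 = [] := by
        norm_num [PySem.List.pyRange_one_eq_nil]
      rw [hnil]
      simp only [List.foldl_nil]
      unfold pvInv
      dsimp only
      refine ⟨rfl, by simp, le_rfl, by norm_num, le_rfl, by simp, ?_, by simp, ?_, fun h => by simpa using h⟩
      · have h0 : ((0:Nat) + 1 : Nat) - (1:Int) = ((0:Nat) : Int) := by norm_num
        rw [h0, PySem.List.pyGetD_natCast]
        have : 0 < a.length := by omega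
        simp [List.getD, this]
      · have h1 : (((0:Nat) + 1 : Nat) : Int) = 1 := by norm_num
        rw [h1]
        norm_num [PySem.List.pyRange_one_eq_nil]
    · have h1 : 1 ≤ k := by omega
      have hlt : k < a.length := by omega
      have hr : PySem.List.pyRange 1 (((k:Nat) + 1 : Nat) : Int) 1
          = PySem.List.pyRange 1 (k : Int) 1 ++ [(k : Int)] := by
        push_cast
        exact PySem.List.pyRange_one_succ_right (by omega)
      rw [hr, List.foldl_append, List.foldl_append]
      simp only [List.foldl_cons, List.foldl_nil]
      have hinv := pvStep_lemma a num hP k h1 hlt _ _ (ih h1 (by omega))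
      have hc : (((k:Nat) + 1 : Nat) : Int) = (k : Int) + 1 := by push_cast; ring
      rw [hc]
      exact hinv

-- ===== VERDICT (by name: the statement is the Claim_ definition above) =====
theorem stop_numbers_spec : Claim_equal_stop_numbers := by
  intro a x num _ hPre
  unfold Spec_stop_numbers stop_numbers stop_numbers_alt
  have hL : ((PySem.List.pyRange 1 (a.length : Int) 1).foldl (pvStepA a num)
              (List.replicate a.length (0:Int), (0:Int))).1
          = ((PySem.List.pyRange 1 (a.length : Int) 1).foldl (pvStepB a num)
              (List.replicate a.length (0:Int), ([] : List Int), (0:Int), (0:Int))).1 := by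
    by_cases hn : a.length = 0
    · rw [hn]
      norm_num [PySem.List.pyRange_one_eq_nil]
    · exact (pvMain a num hPre.1 a.length (by omega) le_rfl).1
  simp only []
  rw [hL]
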